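-- pv_equiv track=rewrite | github.com/projectacrn/acrn-hypervisor | misc/config_tools/target/parser_lib.py | handle_block_dev
-- ===== SOURCE A (Python) =====
-- def handle_block_dev(line):
--     """Handle if it match root device information pattern
--     :param line: one line of information which had decoded to 'ASCII'
--     """
--     block_format = ''
--     for root_type in line.split():
--         if "ext4" in root_type or "ext3" in root_type:
--             block_type = ''
--             block_dev = line.split()[0]
--             for type_str in line.split():
--                 if "TYPE=" in type_str:
--                     block_type = type_str
--
--             block_format = block_dev + " " + block_type
--             return block_format
--
--     return block_format
-- ===== SOURCE B (Python) =====
-- def handle_block_dev(line):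
--     """Handle if it match root device information pattern
--     :param line: one line of information which had decoded to 'ASCII'
--     """
--     tokens = line.split()
--     found_ext = False
--     last_type = ''
--     for tok in tokens:
--         if "ext4" in tok or "ext3" in tok:
--             found_ext = True
--         if "TYPE=" in tok:
--             last_type = tok
--     return tokens[0] + " " + last_type if found_ext else ''
-- ===== Notes on version B (the rewrite author's own statement) =====
-- stated objective: simpler
-- what changed: B splits the line once and makes one pass keeping a found-ext flag and the last TYPE= token, instead of A's outer detection loop that re-splits the line and rescans all tokens in a nested inner loop.
import Mathlib
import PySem

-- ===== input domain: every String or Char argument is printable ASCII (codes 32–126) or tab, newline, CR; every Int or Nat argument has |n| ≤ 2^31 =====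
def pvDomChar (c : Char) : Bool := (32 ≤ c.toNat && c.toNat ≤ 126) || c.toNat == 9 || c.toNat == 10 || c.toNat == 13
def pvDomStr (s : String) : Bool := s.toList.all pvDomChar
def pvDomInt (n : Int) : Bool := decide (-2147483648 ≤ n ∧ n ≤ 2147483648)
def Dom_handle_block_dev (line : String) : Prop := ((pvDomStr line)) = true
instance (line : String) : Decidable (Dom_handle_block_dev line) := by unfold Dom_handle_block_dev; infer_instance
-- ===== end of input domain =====

-- B replaces A's outer-detect loop with nested re-split/rescan by one split and a single pass (simpler).

-- ===== PORT A =====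
-- outer 'for root_type in line.split()' with early return; on a match, block_dev = line.split()[0]
-- (the list is nonempty there since the loop is iterating over it, so the .getD "" default is unreachable)
-- and the inner 'for type_str in line.split()' keeping the last token containing "TYPE=".
def pvALoop (line : String) : List String → String
  | [] => ""
  | t :: rest =>
    if PySem.Str.isIn "ext4" t || PySem.Str.isIn "ext3" t then
      let block_dev := (PySem.List.pyGet? (PySem.Str.split₀ line) 0).getD ""
      let block_type := (PySem.Str.split₀ line).foldl
        (fun bt ts => if PySem.Str.isIn "TYPE=" ts then ts else bt) ""
      block_dev ++ " " ++ block_type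
    else pvALoop line rest

def handle_block_dev (line : String) : String :=
  pvALoop line (PySem.Str.split₀ line)

-- ===== PORT B =====
-- single pass over the tokens, carrying (found_ext, last_type); tokens[0] only read when found_ext
-- (then the list is nonempty, so the .getD "" default is unreachable).
def handle_block_dev_alt (line : String) : String :=
  let tokens := PySem.Str.split₀ line
  let st := tokens.foldl
    (fun (s : Bool × String) tok =>
      (s.1 || (PySem.Str.isIn "ext4" tok || PySem.Str.isIn "ext3" tok),
       if PySem.Str.isIn "TYPE=" tok then tok else s.2)) (false, "")
  if st.1 then (PySem.List.pyGet? tokens 0).getD "" ++ " " ++ st.2 else ""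

-- ===== PRECONDITION & SPEC =====
def Spec_handle_block_dev (line : String) (out : String) : Prop := out = handle_block_dev_alt line
instance (line : String) (out : String) : Decidable (Spec_handle_block_dev line out) := by unfold Spec_handle_block_dev; infer_instance

-- ===== CLAIM (what is proved, stated in full; the proofs are below) =====
def Claim_equal_handle_block_dev : Prop := ∀ (line : String), Dom_handle_block_dev line → Spec_handle_block_dev line (handle_block_dev line)

-- ===== LEMMAS AND PROOFS =====

-- A's loop returns the fixed "dev + ' ' + last TYPE= token" string iff some token contains ext4/ext3.
theorem pvALoop_eq (line : String) (ts : List String) :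
    pvALoop line ts =
      if ts.any (fun t => PySem.Str.isIn "ext4" t || PySem.Str.isIn "ext3" t) then
        (PySem.List.pyGet? (PySem.Str.split₀ line) 0).getD "" ++ " " ++
          (PySem.Str.split₀ line).foldl
            (fun bt ts => if PySem.Str.isIn "TYPE=" ts then ts else bt) ""
      else "" := by
  induction ts with
  | nil => simp [pvALoop]
  | cons t rest ih =>
    cases h : (PySem.Str.isIn "ext4" t || PySem.Str.isIn "ext3" t) with
    | true =>
      simp only [pvALoop, h, List.any_cons, Bool.true_or]; rfl
    | false =>
      simp only [pvALoop, h, List.any_cons, Bool.false_or, Bool.false_eq_true, if_false, ih]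

-- B's fold: the flag component is the 'any' of the tokens.
theorem pvBFold_fst (ts : List String) (b : Bool) (s : String) :
    (ts.foldl
      (fun (s : Bool × String) tok =>
        (s.1 || (PySem.Str.isIn "ext4" tok || PySem.Str.isIn "ext3" tok),
         if PySem.Str.isIn "TYPE=" tok then tok else s.2)) (b, s)).1
      = (b || ts.any (fun t => PySem.Str.isIn "ext4" t || PySem.Str.isIn "ext3" t)) := by
  induction ts generalizing b s with
  | nil => simp
  | cons t rest ih => simp only [List.foldl_cons, List.any_cons]; rw [ih]; simp [Bool.or_assoc]

-- B's fold: the last_type component is exactly A's inner-loop fold.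
theorem pvBFold_snd (ts : List String) (b : Bool) (s : String) :
    (ts.foldl
      (fun (s : Bool × String) tok =>
        (s.1 || (PySem.Str.isIn "ext4" tok || PySem.Str.isIn "ext3" tok),
         if PySem.Str.isIn "TYPE=" tok then tok else s.2)) (b, s)).2
      = ts.foldl (fun bt tok => if PySem.Str.isIn "TYPE=" tok then tok else bt) s := by
  induction ts generalizing b s with
  | nil => simp
  | cons t rest ih => simp only [List.foldl_cons]; exact ih _ _

-- ===== VERDICT (by name: the statement is the Claim_ definition above) =====
theorem handle_block_dev_spec : Claim_equal_handle_block_dev := by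
  intro line _
  unfold Spec_handle_block_dev handle_block_dev handle_block_dev_alt
  rw [pvALoop_eq]
  simp only [pvBFold_fst, pvBFold_snd, Bool.false_or]
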